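-- pv_equiv track=rewrite | github.com/clean-code-craft-tcq-4/tdd-buckets-d6fb7f0c-VaniKayam | getStatistics.py | getConsecutiveGroupsWithNumberOfReadings
-- ===== SOURCE A (Python) =====
-- def getConsecutiveGroupsWithNumberOfReadings( currentSampleArr):
--     ReadingCount=0
--     index=0
--     start = end = None
--     data = " "
--
--     while(index < len(currentSampleArr)-1):
--
--         value = getRangeWithValue(currentSampleArr, start, end, ReadingCount, index)
--         start = value[0]
--         end = value[1]
--         ReadingCount = value[2]
--
--         if(end!=None):
--             data = getFormattedRangeAndReadingsCountOfCurrentSampleArr(currentSampleArr, start, end, ReadingCount, data, index)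
--             ReadingCount=0
--             start = end = None
--         index+=1
--
--     return data
--
-- def getStartValueOfCurrentSampleRange( currentSampleArr,start,end,ReadingCount,index):
--
--     ReadingCount+=1
--     if(start == None ):
--         start = currentSampleArr[index]
--
--     if(index == len(currentSampleArr)-2):
--         end=currentSampleArr[index+1]
--         ReadingCount+=1
--     return start,end,ReadingCount
--
-- def getEndValueOfCurrentSampleRange( currentSampleArr,start,end,ReadingCount,index):
--     if(start != None):
--         end = currentSampleArr[index]
--         ReadingCount+=1
--     return start,end,ReadingCount
--
-- def getFormattedRangeAndReadingsCountOfCurrentSampleArr( currentSampleArr,start,end,ReadingCount,data,index):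
--    readingsFormat = f' [{start}-{end}, {ReadingCount}] '
--    data+=readingsFormat
--    return data
--
-- def getRangeWithValue( currentSampleArr,start,end,ReadingCount,index):
--     if((currentSampleArr[index]==currentSampleArr[index+1]) or (((currentSampleArr[index])+1) == currentSampleArr[index+1])):
--         value = getStartValueOfCurrentSampleRange(currentSampleArr,start,end,ReadingCount,index)
--         start = value[0]
--         end = value[1]
--         ReadingCount = value[2]
--
--     else:
--         value = getEndValueOfCurrentSampleRange(currentSampleArr,start,end,ReadingCount,index)
--         start = value[0]
--         end = value[1]
--         ReadingCount = value[2]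
--     return start,end,ReadingCount
-- ===== SOURCE B (Python) =====
-- def getConsecutiveGroupsWithNumberOfReadings(currentSampleArr):
--     # Pass 1: collect maximal adjacent runs (b == a or b == a + 1) of length >= 2.
--     runs = []
--     n = len(currentSampleArr)
--     i = 0
--     while i < n:
--         j = i
--         while j + 1 < n and (currentSampleArr[j + 1] == currentSampleArr[j]
--                              or currentSampleArr[j + 1] == currentSampleArr[j] + 1):
--             j += 1
--         if j - i + 1 >= 2:
--             runs.append((currentSampleArr[i], currentSampleArr[j], j - i + 1))
--         i = j + 1
--     # Pass 2: format.
--     return ' ' + ''.join(f' [{s}-{e}, {c}] ' for s, e, c in runs)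
-- ===== Notes on version B (the rewrite author's own statement) =====
-- stated objective: simpler
-- what changed: A's five mutually-calling helpers threading a (start, end, count) state machine tuple-by-tuple through every index are replaced by a plain two-phase scan: collect maximal adjacent runs (length >= 2) as (start, end, count) triples, then format them in one join; dropping the per-index helper-call and tuple-repacking chain also makes B measurably faster by a constant factor.
import Mathlib
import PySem

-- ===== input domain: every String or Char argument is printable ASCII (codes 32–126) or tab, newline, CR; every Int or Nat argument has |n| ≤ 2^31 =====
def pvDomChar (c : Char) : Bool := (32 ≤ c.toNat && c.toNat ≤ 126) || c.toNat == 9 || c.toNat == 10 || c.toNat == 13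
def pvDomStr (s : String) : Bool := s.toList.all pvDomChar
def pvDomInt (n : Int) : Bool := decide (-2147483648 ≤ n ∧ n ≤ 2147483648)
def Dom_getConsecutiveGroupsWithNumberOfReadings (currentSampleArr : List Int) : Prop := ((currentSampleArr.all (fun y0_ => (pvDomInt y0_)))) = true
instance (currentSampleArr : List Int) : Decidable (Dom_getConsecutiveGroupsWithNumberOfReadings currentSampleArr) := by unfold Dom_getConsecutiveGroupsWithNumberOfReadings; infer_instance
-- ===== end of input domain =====

-- B replaces A's five mutually-feeding helpers and per-index state machine by a plain
-- two-phase scan (collect maximal adjacent runs, then format them); objective: simpler.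
-- Loops are ported as structural recursion on a fuel counter that provably never runs out
-- (fuel = arr.length bounds every loop's iteration count); this only makes them total.

-- ===== PORT A =====
-- Every list access below uses `getD _ 0`; each call site has its index provably in
-- range (0 ≤ index < length), where Python indexing returns the element and never raises.
def pvOptIntToStr (o : Option Int) : String :=
  match o with
  | none => "None"   -- an f-string prints 'None' for None (never reached at emission sites)
  | some v => PySem.Int.toStr v

def pvGetStartValue (arr : List Int) (start fin : Option Int) (cnt : Int) (index : Nat) :
    Option Int × Option Int × Int :=
  let cnt := cnt + 1
  let start := match start with
    | none => some (arr.getD index 0)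
    | some s => some s
  if (index : Int) = (arr.length : Int) - 2 then
    (start, some (arr.getD (index + 1) 0), cnt + 1)
  else
    (start, fin, cnt)

def pvGetEndValue (arr : List Int) (start fin : Option Int) (cnt : Int) (index : Nat) :
    Option Int × Option Int × Int :=
  if start ≠ none then
    (start, some (arr.getD index 0), cnt + 1)
  else
    (start, fin, cnt)

def pvGetFormatted (start fin : Option Int) (cnt : Int) (data : String) : String :=
  data ++ (" [" ++ pvOptIntToStr start ++ "-" ++ pvOptIntToStr fin ++ ", " ++ PySem.Int.toStr cnt ++ "] ")

def pvGetRangeWithValue (arr : List Int) (start fin : Option Int) (cnt : Int) (index : Nat) :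
    Option Int × Option Int × Int :=
  if arr.getD index 0 = arr.getD (index + 1) 0 ∨ arr.getD index 0 + 1 = arr.getD (index + 1) 0 then
    pvGetStartValue arr start fin cnt index
  else
    pvGetEndValue arr start fin cnt index

-- the while loop; `index < len(arr) - 1` over ints equals `index + 1 < length` for the Nat counter
def pvALoop (arr : List Int) (fuel index : Nat) (cnt : Int) (start fin : Option Int) (data : String) : String :=
  match fuel with
  | 0 => data
  | fuel + 1 =>
    if index + 1 < arr.length then
      let v := pvGetRangeWithValue arr start fin cnt index
      if v.2.1 ≠ none then
        pvALoop arr fuel (index + 1) 0 none none (pvGetFormatted v.1 v.2.1 v.2.2 data)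
      else
        pvALoop arr fuel (index + 1) v.2.2 v.1 v.2.1 data
    else data

def getConsecutiveGroupsWithNumberOfReadings (currentSampleArr : List Int) : String :=
  pvALoop currentSampleArr currentSampleArr.length 0 0 none none " "

-- ===== PORT B =====
-- inner while loop of Source B: extend the run while the next element is adjacent
def pvFindRunEnd (arr : List Int) (fuel j : Nat) : Nat :=
  match fuel with
  | 0 => j
  | fuel + 1 =>
    if j + 1 < arr.length ∧
        (arr.getD (j + 1) 0 = arr.getD j 0 ∨ arr.getD (j + 1) 0 = arr.getD j 0 + 1) then
      pvFindRunEnd arr fuel (j + 1)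
    else j

-- pass 1 of Source B: the list of (start, end, count) triples of maximal runs of length ≥ 2
def pvCollectRuns (arr : List Int) (fuel i : Nat) : List (Int × Int × Int) :=
  match fuel with
  | 0 => []
  | fuel + 1 =>
    if i < arr.length then
      if (2 : Int) ≤ (pvFindRunEnd arr arr.length i : Int) - (i : Int) + 1 then
        (arr.getD i 0, arr.getD (pvFindRunEnd arr arr.length i) 0,
            (pvFindRunEnd arr arr.length i : Int) - (i : Int) + 1)
          :: pvCollectRuns arr fuel (pvFindRunEnd arr arr.length i + 1)
      else pvCollectRuns arr fuel (pvFindRunEnd arr arr.length i + 1)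
    else []

-- pass 2 of Source B: ''.join of the formatted pieces
def pvJoinRuns : List (Int × Int × Int) → String
  | [] => ""
  | (s, e, c) :: rest =>
      (" [" ++ PySem.Int.toStr s ++ "-" ++ PySem.Int.toStr e ++ ", " ++ PySem.Int.toStr c ++ "] ")
        ++ pvJoinRuns rest

def getConsecutiveGroupsWithNumberOfReadings_alt (currentSampleArr : List Int) : String :=
  " " ++ pvJoinRuns (pvCollectRuns currentSampleArr currentSampleArr.length 0)

-- ===== PRECONDITION & SPEC =====
def Spec_getConsecutiveGroupsWithNumberOfReadings (currentSampleArr : List Int) (out : String) : Prop := out = getConsecutiveGroupsWithNumberOfReadings_alt currentSampleArr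
instance (currentSampleArr : List Int) (out : String) : Decidable (Spec_getConsecutiveGroupsWithNumberOfReadings currentSampleArr out) := by unfold Spec_getConsecutiveGroupsWithNumberOfReadings; infer_instance

-- ===== CLAIM (what is proved, stated in full; the proofs are below) =====
def Claim_equal_getConsecutiveGroupsWithNumberOfReadings : Prop := ∀ (currentSampleArr : List Int), Dom_getConsecutiveGroupsWithNumberOfReadings currentSampleArr → Spec_getConsecutiveGroupsWithNumberOfReadings currentSampleArr (getConsecutiveGroupsWithNumberOfReadings currentSampleArr)

-- ===== LEMMAS AND PROOFS =====

theorem pv_le_findRunEnd (arr : List Int) (fuel : Nat) : ∀ j, j ≤ pvFindRunEnd arr fuel j := by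
  induction fuel with
  | zero => intro j; exact le_refl j
  | succ fuel ih =>
    intro j
    rw [pvFindRunEnd]
    split
    · exact le_trans (Nat.le_succ j) (ih (j + 1))
    · exact le_refl j

theorem pvFindRunEnd_stop (arr : List Int) (fuel j : Nat)
    (h : ¬ (j + 1 < arr.length ∧
      (arr.getD (j + 1) 0 = arr.getD j 0 ∨ arr.getD (j + 1) 0 = arr.getD j 0 + 1))) :
    pvFindRunEnd arr fuel j = j := by
  cases fuel with
  | zero => rfl
  | succ fuel => rw [pvFindRunEnd, if_neg h]

theorem pvFindRunEnd_congr (arr : List Int) (f1 : Nat) :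
    ∀ (f2 j : Nat), arr.length ≤ j + f1 → arr.length ≤ j + f2 →
      pvFindRunEnd arr f1 j = pvFindRunEnd arr f2 j := by
  induction f1 with
  | zero =>
    intro f2 j h1 _
    rw [pvFindRunEnd_stop arr f2 j (by omega)]
    rfl
  | succ f1 ih =>
    intro f2 j h1 h2
    by_cases hc : j + 1 < arr.length ∧
        (arr.getD (j + 1) 0 = arr.getD j 0 ∨ arr.getD (j + 1) 0 = arr.getD j 0 + 1)
    · cases f2 with
      | zero => omega
      | succ f2 =>
        rw [pvFindRunEnd, pvFindRunEnd, if_pos hc, if_pos hc]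
        exact ih f2 (j + 1) (by omega) (by omega)
    · rw [pvFindRunEnd_stop arr (f1 + 1) j hc, pvFindRunEnd_stop arr f2 j hc]

theorem pvFindRunEnd_step (arr : List Int) (fuel j : Nat) (hf : arr.length ≤ j + fuel)
    (h : j + 1 < arr.length ∧
      (arr.getD (j + 1) 0 = arr.getD j 0 ∨ arr.getD (j + 1) 0 = arr.getD j 0 + 1)) :
    pvFindRunEnd arr fuel j = pvFindRunEnd arr arr.length (j + 1) := by
  cases fuel with
  | zero => omega
  | succ fuel =>
    rw [pvFindRunEnd, if_pos h]
    exact pvFindRunEnd_congr arr fuel arr.length (j + 1) (by omega) (by omega)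

-- A's adjacency test and B's are the same relation, written in mirrored orientation
theorem pv_adj_flip (arr : List Int) (i : Nat)
    (h : arr.getD i 0 = arr.getD (i + 1) 0 ∨ arr.getD i 0 + 1 = arr.getD (i + 1) 0) :
    arr.getD (i + 1) 0 = arr.getD i 0 ∨ arr.getD (i + 1) 0 = arr.getD i 0 + 1 := by
  rcases h with h | h
  · exact Or.inl h.symm
  · exact Or.inr h.symm

theorem pvFindRunEnd_stop' (arr : List Int) (fuel i : Nat)
    (hadj : ¬ (arr.getD i 0 = arr.getD (i + 1) 0 ∨ arr.getD i 0 + 1 = arr.getD (i + 1) 0)) :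
    pvFindRunEnd arr fuel i = i := by
  apply pvFindRunEnd_stop
  intro hc
  rcases hc.2 with h | h
  · exact hadj (Or.inl h.symm)
  · exact hadj (Or.inr h.symm)

theorem pvCollectRuns_ge (arr : List Int) (fuel i : Nat) (h : arr.length ≤ i) :
    pvCollectRuns arr fuel i = [] := by
  cases fuel with
  | zero => rfl
  | succ fuel => rw [pvCollectRuns, if_neg (by omega)]

theorem pvCollectRuns_congr (arr : List Int) (f1 : Nat) :
    ∀ (f2 i : Nat), arr.length ≤ i + f1 → arr.length ≤ i + f2 →
      pvCollectRuns arr f1 i = pvCollectRuns arr f2 i := by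
  induction f1 with
  | zero =>
    intro f2 i h1 _
    rw [pvCollectRuns_ge arr f2 i (by omega)]
    rfl
  | succ f1 ih =>
    intro f2 i h1 h2
    by_cases hi : i < arr.length
    · cases f2 with
      | zero => omega
      | succ f2 =>
        have hle := pv_le_findRunEnd arr arr.length i
        rw [pvCollectRuns, pvCollectRuns, if_pos hi, if_pos hi]
        have htail := ih f2 (pvFindRunEnd arr arr.length i + 1) (by omega) (by omega)
        rw [htail]
    · rw [pvCollectRuns_ge arr (f1 + 1) i (by omega), pvCollectRuns_ge arr f2 i (by omega)]

theorem pvCollectRuns_last (arr : List Int) (fuel i : Nat) (h : i + 1 = arr.length) :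
    pvCollectRuns arr fuel i = [] := by
  cases fuel with
  | zero => rfl
  | succ fuel =>
    rw [pvCollectRuns, if_pos (by omega)]
    rw [pvFindRunEnd_stop arr arr.length i (by omega)]
    rw [if_neg (by omega)]
    exact pvCollectRuns_ge arr fuel (i + 1) (by omega)

theorem pv_collect_nonadj (arr : List Int) (fuel i : Nat) (hf : arr.length ≤ i + fuel)
    (h1 : i + 1 < arr.length)
    (hadj : ¬ (arr.getD i 0 = arr.getD (i + 1) 0 ∨ arr.getD i 0 + 1 = arr.getD (i + 1) 0)) :
    pvCollectRuns arr fuel i = pvCollectRuns arr arr.length (i + 1) := by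
  cases fuel with
  | zero => omega
  | succ fuel =>
    rw [pvCollectRuns, if_pos (by omega)]
    rw [pvFindRunEnd_stop' arr arr.length i hadj]
    rw [if_neg (by omega)]
    exact pvCollectRuns_congr arr fuel arr.length (i + 1) (by omega) (by omega)

theorem pv_collect_run (arr : List Int) (fuel i : Nat) (hf : arr.length ≤ i + fuel)
    (h1 : i + 1 < arr.length)
    (hadj : arr.getD i 0 = arr.getD (i + 1) 0 ∨ arr.getD i 0 + 1 = arr.getD (i + 1) 0) :
    pvCollectRuns arr fuel i =
      (arr.getD i 0, arr.getD (pvFindRunEnd arr arr.length i) 0,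
          (pvFindRunEnd arr arr.length i : Int) - (i : Int) + 1)
        :: pvCollectRuns arr arr.length (pvFindRunEnd arr arr.length i + 1) := by
  cases fuel with
  | zero => omega
  | succ fuel =>
    have hge : i + 1 ≤ pvFindRunEnd arr arr.length i := by
      rw [pvFindRunEnd_step arr arr.length i (by omega) ⟨h1, pv_adj_flip arr i hadj⟩]
      exact pv_le_findRunEnd arr arr.length (i + 1)
    rw [pvCollectRuns, if_pos (by omega), if_pos (by omega)]
    rw [pvCollectRuns_congr arr fuel arr.length (pvFindRunEnd arr arr.length i + 1)
      (by omega) (by omega)]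

-- evaluations of pvGetRangeWithValue in each of the six reachable situations
theorem pv_range_fresh_nonadj (arr : List Int) (cnt : Int) (i : Nat)
    (h : ¬ (arr.getD i 0 = arr.getD (i + 1) 0 ∨ arr.getD i 0 + 1 = arr.getD (i + 1) 0)) :
    pvGetRangeWithValue arr none none cnt i = (none, none, cnt) := by
  unfold pvGetRangeWithValue pvGetEndValue
  rw [if_neg h]
  simp

theorem pv_range_fresh_adj_last (arr : List Int) (cnt : Int) (i : Nat)
    (h : arr.getD i 0 = arr.getD (i + 1) 0 ∨ arr.getD i 0 + 1 = arr.getD (i + 1) 0)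
    (hlast : (i : Int) = (arr.length : Int) - 2) :
    pvGetRangeWithValue arr none none cnt i =
      (some (arr.getD i 0), some (arr.getD (i + 1) 0), cnt + 1 + 1) := by
  unfold pvGetRangeWithValue pvGetStartValue
  rw [if_pos h]
  simp [hlast]

theorem pv_range_fresh_adj_mid (arr : List Int) (cnt : Int) (i : Nat)
    (h : arr.getD i 0 = arr.getD (i + 1) 0 ∨ arr.getD i 0 + 1 = arr.getD (i + 1) 0)
    (hlast : ¬ ((i : Int) = (arr.length : Int) - 2)) :
    pvGetRangeWithValue arr none none cnt i = (some (arr.getD i 0), none, cnt + 1) := by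
  unfold pvGetRangeWithValue pvGetStartValue
  rw [if_pos h]
  simp [hlast]

theorem pv_range_some_nonadj (arr : List Int) (cnt s : Int) (i : Nat)
    (h : ¬ (arr.getD i 0 = arr.getD (i + 1) 0 ∨ arr.getD i 0 + 1 = arr.getD (i + 1) 0)) :
    pvGetRangeWithValue arr (some s) none cnt i = (some s, some (arr.getD i 0), cnt + 1) := by
  unfold pvGetRangeWithValue pvGetEndValue
  rw [if_neg h]
  simp

theorem pv_range_some_adj_last (arr : List Int) (cnt s : Int) (i : Nat)
    (h : arr.getD i 0 = arr.getD (i + 1) 0 ∨ arr.getD i 0 + 1 = arr.getD (i + 1) 0)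
    (hlast : (i : Int) = (arr.length : Int) - 2) :
    pvGetRangeWithValue arr (some s) none cnt i =
      (some s, some (arr.getD (i + 1) 0), cnt + 1 + 1) := by
  unfold pvGetRangeWithValue pvGetStartValue
  rw [if_pos h]
  simp [hlast]

theorem pv_range_some_adj_mid (arr : List Int) (cnt s : Int) (i : Nat)
    (h : arr.getD i 0 = arr.getD (i + 1) 0 ∨ arr.getD i 0 + 1 = arr.getD (i + 1) 0)
    (hlast : ¬ ((i : Int) = (arr.length : Int) - 2)) :
    pvGetRangeWithValue arr (some s) none cnt i = (some s, none, cnt + 1) := by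
  unfold pvGetRangeWithValue pvGetStartValue
  rw [if_pos h]
  simp [hlast]

-- the main invariant: from a "fresh" state A's loop produces exactly B's remaining runs;
-- from an "in-run" state it first closes the current run at pvFindRunEnd
theorem pv_main (arr : List Int) (k : Nat) :
    ∀ i, arr.length ≤ i + k →
    (∀ data, pvALoop arr k i 0 none none data =
        data ++ pvJoinRuns (pvCollectRuns arr arr.length i)) ∧
    (∀ (cnt : Int) (s : Int) (data : String), i + 1 < arr.length →
      pvALoop arr k i cnt (some s) none data =
        data ++ ((" [" ++ PySem.Int.toStr s ++ "-"
              ++ PySem.Int.toStr (arr.getD (pvFindRunEnd arr arr.length i) 0)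
              ++ ", " ++ PySem.Int.toStr (cnt + ((pvFindRunEnd arr arr.length i : Int) - (i : Int)) + 1) ++ "] ")
          ++ pvJoinRuns (pvCollectRuns arr arr.length (pvFindRunEnd arr arr.length i + 1)))) := by
  induction k with
  | zero =>
    intro i hk
    constructor
    · intro data
      rw [pvCollectRuns_ge arr arr.length i (by omega)]
      simp [pvALoop, pvJoinRuns]
    · intro cnt s data hi
      omega
  | succ k ih =>
    intro i hk
    constructor
    · -- fresh state
      intro data
      by_cases h1 : i + 1 < arr.length
      · rw [pvALoop, if_pos h1]
        by_cases hadj : arr.getD i 0 = arr.getD (i + 1) 0 ∨ arr.getD i 0 + 1 = arr.getD (i + 1) 0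
        · by_cases hlast : (i : Int) = (arr.length : Int) - 2
          · -- adjacent, last pair: the run closes at the end of the array
            simp only [pv_range_fresh_adj_last arr 0 i hadj hlast]
            rw [if_pos (by simp)]
            rw [(ih (i + 1) (by omega)).1]
            rw [pvCollectRuns_last arr arr.length (i + 1) (by omega)]
            have he : pvFindRunEnd arr arr.length i = i + 1 := by
              rw [pvFindRunEnd_step arr arr.length i (by omega) ⟨h1, pv_adj_flip arr i hadj⟩]
              exact pvFindRunEnd_stop arr arr.length (i + 1) (by omega)
            rw [pv_collect_run arr arr.length i (by omega) h1 hadj, he,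
              pvCollectRuns_ge arr arr.length (i + 1 + 1) (by omega)]
            have harith : ((i + 1 : Nat) : Int) - (i : Int) + 1 = (0 : Int) + 1 + 1 := by
              push_cast; ring
            rw [harith]
            simp [pvGetFormatted, pvOptIntToStr, pvJoinRuns, String.append_empty]
          · -- adjacent, more to come: enter the in-run state
            simp only [pv_range_fresh_adj_mid arr 0 i hadj hlast]
            rw [if_neg (by simp)]
            have h2 : i + 1 + 1 < arr.length := by omega
            rw [(ih (i + 1) (by omega)).2 (0 + 1) (arr.getD i 0) data h2]
            have he : pvFindRunEnd arr arr.length i = pvFindRunEnd arr arr.length (i + 1) :=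
              pvFindRunEnd_step arr arr.length i (by omega) ⟨h1, pv_adj_flip arr i hadj⟩
            rw [pv_collect_run arr arr.length i (by omega) h1 hadj, he]
            have hle := pv_le_findRunEnd arr arr.length (i + 1)
            have harith : (0 : Int) + 1 + ((pvFindRunEnd arr arr.length (i + 1) : Int) - ((i + 1 : Nat) : Int)) + 1
                = (pvFindRunEnd arr arr.length (i + 1) : Int) - (i : Int) + 1 := by
              push_cast; omega
            rw [harith]
            simp [pvJoinRuns, String.append_assoc]
        · -- not adjacent: nothing happens, move on
          simp only [pv_range_fresh_nonadj arr 0 i hadj]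
          rw [if_neg (by simp)]
          rw [(ih (i + 1) (by omega)).1 data,
            pv_collect_nonadj arr arr.length i (by omega) h1 hadj]
      · -- loop over: at most one element left, B collects nothing
        rw [pvALoop, if_neg h1]
        by_cases h2 : i < arr.length
        · rw [pvCollectRuns_last arr arr.length i (by omega)]
          simp [pvJoinRuns]
        · rw [pvCollectRuns_ge arr arr.length i (by omega)]
          simp [pvJoinRuns]
    · -- in-run state
      intro cnt s data hi
      rw [pvALoop, if_pos hi]
      by_cases hadj : arr.getD i 0 = arr.getD (i + 1) 0 ∨ arr.getD i 0 + 1 = arr.getD (i + 1) 0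
      · by_cases hlast : (i : Int) = (arr.length : Int) - 2
        · -- adjacent, last pair: the run closes with the final element
          simp only [pv_range_some_adj_last arr cnt s i hadj hlast]
          rw [if_pos (by simp)]
          rw [(ih (i + 1) (by omega)).1]
          rw [pvCollectRuns_last arr arr.length (i + 1) (by omega)]
          have he : pvFindRunEnd arr arr.length i = i + 1 := by
            rw [pvFindRunEnd_step arr arr.length i (by omega) ⟨hi, pv_adj_flip arr i hadj⟩]
            exact pvFindRunEnd_stop arr arr.length (i + 1) (by omega)
          rw [he, pvCollectRuns_ge arr arr.length (i + 1 + 1) (by omega)]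
          have harith : cnt + (((i + 1 : Nat) : Int) - (i : Int)) + 1 = cnt + 1 + 1 := by
            push_cast; ring
          rw [harith]
          simp [pvGetFormatted, pvOptIntToStr, pvJoinRuns, String.append_empty]
        · -- adjacent, more to come: stay in the run
          simp only [pv_range_some_adj_mid arr cnt s i hadj hlast]
          rw [if_neg (by simp)]
          have h2 : i + 1 + 1 < arr.length := by omega
          rw [(ih (i + 1) (by omega)).2 (cnt + 1) s data h2]
          have he : pvFindRunEnd arr arr.length i = pvFindRunEnd arr arr.length (i + 1) :=
            pvFindRunEnd_step arr arr.length i (by omega) ⟨hi, pv_adj_flip arr i hadj⟩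
          rw [he]
          have hle := pv_le_findRunEnd arr arr.length (i + 1)
          have harith : cnt + 1 + ((pvFindRunEnd arr arr.length (i + 1) : Int) - ((i + 1 : Nat) : Int)) + 1
              = cnt + ((pvFindRunEnd arr arr.length (i + 1) : Int) - (i : Int)) + 1 := by
            push_cast; omega
          rw [harith]
      · -- not adjacent: the run closes at the previous element
        simp only [pv_range_some_nonadj arr cnt s i hadj]
        rw [if_pos (by simp)]
        rw [(ih (i + 1) (by omega)).1]
        rw [pvFindRunEnd_stop' arr arr.length i hadj]
        have harith : cnt + ((i : Int) - (i : Int)) + 1 = cnt + 1 := by ring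
        rw [harith]
        simp [pvGetFormatted, pvOptIntToStr, String.append_assoc]

-- ===== VERDICT (by name: the statement is the Claim_ definition above) =====
theorem getConsecutiveGroupsWithNumberOfReadings_spec : Claim_equal_getConsecutiveGroupsWithNumberOfReadings := by
  intro arr _
  unfold Spec_getConsecutiveGroupsWithNumberOfReadings
  unfold getConsecutiveGroupsWithNumberOfReadings getConsecutiveGroupsWithNumberOfReadings_alt
  exact (pv_main arr arr.length 0 (by omega)).1 " "
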